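-- pv_equiv track=rewrite | github.com/romain22222/VisibilityLattices | JMIV2026_rev1/make_zip.py | skip_optional
-- ===== SOURCE A (Python) =====
-- def skip_optional(text: str, pos: int) -> int:
--     """Skip whitespace then an optional [...] argument if present."""
--     while pos < len(text) and text[pos] in " \t\n":
--         pos += 1
--     if pos < len(text) and text[pos] == "[":
--         depth = 0
--         while pos < len(text):
--             if text[pos] == "[":
--                 depth += 1
--             elif text[pos] == "]":
--                 depth -= 1
--                 if depth == 0:
--                     return pos + 1
--             pos += 1
--     return pos
-- ===== SOURCE B (Python) =====
-- def _match(text, i):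
--     """Scan for the ']' closing an already-consumed '['; recurse into nested
--     groups; return the index just past that ']' (len(text) if unmatched)."""
--     while i < len(text):
--         c = text[i]
--         if c == "]":
--             return i + 1
--         i = _match(text, i + 1) if c == "[" else i + 1
--     return len(text)
--
-- def skip_optional(text, pos):
--     while True:
--         if pos >= len(text):
--             return pos
--         c = text[pos]
--         if c == "[":
--             return _match(text, pos + 1)
--         if c not in " \t\n":
--             return pos
--         pos += 1
-- ===== Notes on version B (the rewrite author's own statement) =====
-- stated objective: alternative
-- what changed: A uses two staged loops (a whitespace-skip loop, then a scanning loop with a flat integer depth counter); B is a single dispatch scanner that delegates '[' to a recursive matcher consuming one bracket group per call, so bracket control flow follows the nesting structure instead of a depth variable.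
import Mathlib
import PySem

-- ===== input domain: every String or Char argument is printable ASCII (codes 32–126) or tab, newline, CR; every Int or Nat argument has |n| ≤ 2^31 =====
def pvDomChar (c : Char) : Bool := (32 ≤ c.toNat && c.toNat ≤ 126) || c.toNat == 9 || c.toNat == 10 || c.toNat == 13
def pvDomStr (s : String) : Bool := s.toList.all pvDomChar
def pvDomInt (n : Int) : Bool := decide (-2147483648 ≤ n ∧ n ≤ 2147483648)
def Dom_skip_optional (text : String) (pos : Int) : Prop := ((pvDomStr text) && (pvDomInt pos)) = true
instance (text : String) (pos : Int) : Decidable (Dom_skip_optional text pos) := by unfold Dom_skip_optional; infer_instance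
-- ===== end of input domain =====

-- B replaces A's two staged loops (whitespace skip, then a flat depth counter) by a single
-- dispatch scanner plus a recursive bracket matcher shaped by the nesting; objective:
-- alternative decomposition, same cost.


-- ===== PORT A =====
-- `text[pos] in " \t\n"` (shared character-class helper)
def pvIsWs (c : Char) : Bool := c = ' ' || c = '\t' || c = '\n'

-- A's first while loop: skip whitespace
def pvSkipWsA (s : List Char) (pos : Int) : Int :=
  if _h : pos < (s.length : Int) then
    match PySem.List.pyGet? s pos with
    | some c => if pvIsWs c then pvSkipWsA s (pos + 1) else pos
    | none => pos   -- Python raises IndexError here (pos < -len); excluded by Pre_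
  else pos
termination_by ((s.length : Int) - pos).toNat
decreasing_by omega

-- A's second while loop: the depth counter
def pvDepthLoopA (s : List Char) (pos : Int) (depth : Int) : Int :=
  if _h : pos < (s.length : Int) then
    match PySem.List.pyGet? s pos with
    | some c =>
      if c = '[' then pvDepthLoopA s (pos + 1) (depth + 1)
      else if c = ']' then
        if depth - 1 = 0 then pos + 1 else pvDepthLoopA s (pos + 1) (depth - 1)
      else pvDepthLoopA s (pos + 1) depth
    | none => pos   -- Python raises IndexError here; excluded by Pre_
  else pos
termination_by ((s.length : Int) - pos).toNat
decreasing_by all_goals omega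

def skip_optional (text : String) (pos : Int) : Int :=
  if pvSkipWsA text.toList pos < (text.toList.length : Int) ∧
     PySem.List.pyGet? text.toList (pvSkipWsA text.toList pos) = some '[' then
    pvDepthLoopA text.toList (pvSkipWsA text.toList pos) 0
  else pvSkipWsA text.toList pos

-- ===== PORT B =====
-- _match's while loop: look for the ']' closing an already-consumed '[', recursing into
-- nested groups.  The nested recursion is made total by a fuel argument (fuel ≥ remaining
-- length always suffices, so fuel 0 is never reached on admitted inputs).
def pvMatch (s : List Char) : Nat → Int → Int
  | 0, i => i
  | f + 1, i =>
    if i < (s.length : Int) then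
      match PySem.List.pyGet? s i with
      | some c =>
        if c = ']' then i + 1
        else pvMatch s f (if c = '[' then pvMatch s f (i + 1) else i + 1)
      | none => i   -- Python raises IndexError here; excluded by Pre_
    else (s.length : Int)

-- B's single `while True` dispatch loop
def pvScan (s : List Char) (pos : Int) : Int :=
  if _h : ¬ pos < (s.length : Int) then pos
  else
    match PySem.List.pyGet? s pos with
    | some c =>
      if c = '[' then pvMatch s ((s.length : Int) - pos).toNat (pos + 1)
      else if ¬ pvIsWs c then pos
      else pvScan s (pos + 1)
    | none => pos   -- Python raises IndexError here; excluded by Pre_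
termination_by ((s.length : Int) - pos).toNat
decreasing_by omega

def skip_optional_alt (text : String) (pos : Int) : Int := pvScan text.toList pos

-- ===== PRECONDITION & SPEC =====
-- Pre_ excludes exactly pos < -len(text), where A's first subscript text[pos] raises IndexError.
def Pre_skip_optional (text : String) (pos : Int) : Prop :=
  -(text.toList.length : Int) ≤ pos
instance (text : String) (pos : Int) : Decidable (Pre_skip_optional text pos) := by
  unfold Pre_skip_optional; infer_instance

def pvWitness_skip_optional : String × Int := (" [a[b]] x", 0)

def Spec_skip_optional (text : String) (pos : Int) (out : Int) : Prop := out = skip_optional_alt text pos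
instance (text : String) (pos : Int) (out : Int) : Decidable (Spec_skip_optional text pos out) := by unfold Spec_skip_optional; infer_instance

-- ===== CLAIM (what is proved, stated in full; the proofs are below) =====
def Claim_equal_skip_optional : Prop := ∀ (text : String) (pos : Int), Dom_skip_optional text pos → Pre_skip_optional text pos → Spec_skip_optional text pos (skip_optional text pos)

-- ===== LEMMAS AND PROOFS =====

theorem pvMatch_step (s : List Char) (f : Nat) (i : Int) (c : Char)
    (hi : i < (s.length : Int)) (h : PySem.List.pyGet? s i = some c) :
    pvMatch s (f + 1) i =
      (if c = '[' then pvMatch s f (pvMatch s f (i + 1))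
       else if c = ']' then i + 1
       else pvMatch s f (i + 1)) := by
  by_cases hc : c = '['
  · have hne : ¬ c = ']' := by subst hc; decide
    simp [pvMatch, hi, h, hc]
  · by_cases hc2 : c = ']' <;> simp [pvMatch, hi, h, hc, hc2]

theorem pvMatch_end (s : List Char) (f : Nat) (i : Int) (hi : ¬ i < (s.length : Int)) :
    pvMatch s (f + 1) i = (s.length : Int) := by
  simp [pvMatch, hi]

theorem pvDepthLoopA_step (s : List Char) (i d : Int) (c : Char)
    (hi : i < (s.length : Int)) (h : PySem.List.pyGet? s i = some c) :
    pvDepthLoopA s i d =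
      (if c = '[' then pvDepthLoopA s (i + 1) (d + 1)
       else if c = ']' then
         if d - 1 = 0 then i + 1 else pvDepthLoopA s (i + 1) (d - 1)
       else pvDepthLoopA s (i + 1) d) := by
  rw [pvDepthLoopA, dif_pos hi]
  simp only [h]

theorem pvDepthLoopA_end (s : List Char) (i d : Int) (hi : ¬ i < (s.length : Int)) :
    pvDepthLoopA s i d = i := by
  rw [pvDepthLoopA, dif_neg hi]

theorem pvGet_some (s : List Char) (i : Int)
    (hlo : -(s.length : Int) ≤ i) (hi : i < (s.length : Int)) :
    ∃ c, PySem.List.pyGet? s i = some c := by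
  cases hg : PySem.List.pyGet? s i with
  | none => rw [PySem.List.pyGet?_eq_none_iff] at hg; exact absurd ⟨hlo, hi⟩ hg
  | some c => exact ⟨c, rfl⟩

theorem pvSkipWsA_ge (s : List Char) (pos : Int) : pos ≤ pvSkipWsA s pos := by
  unfold pvSkipWsA
  split
  · cases h : PySem.List.pyGet? s pos with
    | none => simp
    | some c =>
      by_cases hc : pvIsWs c
      · simp only [hc, if_true]
        have := pvSkipWsA_ge s (pos + 1)
        omega
      · simp [hc]
  · simp
termination_by ((s.length : Int) - pos).toNat
decreasing_by omega

-- bounds on B's matcher: with enough fuel and an in-range start it moves strictly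
-- forward and never passes the end
theorem pvMatch_bounds (s : List Char) (f : Nat) (i : Int)
    (hlo : -(s.length : Int) ≤ i) (hhi : i ≤ (s.length : Int))
    (hf : ((s.length : Int) - i).toNat ≤ f) :
    (i < (s.length : Int) → i + 1 ≤ pvMatch s f i) ∧ pvMatch s f i ≤ (s.length : Int) ∧
    (i = (s.length : Int) → pvMatch s f i = (s.length : Int)) := by
  induction f generalizing i with
  | zero =>
    simp only [pvMatch]
    omega
  | succ f ih =>
    by_cases hi : i < (s.length : Int)
    · obtain ⟨c, h⟩ := pvGet_some s i hlo hi
      rw [pvMatch_step s f i c hi h]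
      by_cases hc : c = '['
      · rw [if_pos hc]
        have h1 := ih (i + 1) (by omega) (by omega) (by omega)
        have hj1 : i + 1 ≤ pvMatch s f (i + 1) ∧ pvMatch s f (i + 1) ≤ (s.length : Int) := by
          by_cases hin : i + 1 < (s.length : Int)
          · exact ⟨by have := h1.1 hin; omega, h1.2.1⟩
          · have := h1.2.2 (by omega); omega
        have h2 := ih (pvMatch s f (i + 1)) (by omega) (by omega) (by omega)
        refine ⟨fun _ => ?_, h2.2.1, fun he => absurd he (by omega)⟩
        by_cases hin2 : pvMatch s f (i + 1) < (s.length : Int)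
        · have := h2.1 hin2; omega
        · have := h2.2.2 (by omega); omega
      · by_cases hc2 : c = ']'
        · rw [if_neg hc, if_pos hc2]
          exact ⟨fun _ => le_refl _, by omega, fun he => absurd he (by omega)⟩
        · rw [if_neg hc, if_neg hc2]
          have h1 := ih (i + 1) (by omega) (by omega) (by omega)
          refine ⟨fun _ => ?_, h1.2.1, fun he => absurd he (by omega)⟩
          by_cases hin : i + 1 < (s.length : Int)
          · have := h1.1 hin; omega
          · have := h1.2.2 (by omega); omega
    · rw [pvMatch_end s f i hi]
      exact ⟨fun h => absurd h hi, le_refl _, fun _ => rfl⟩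

-- the heart: A's depth-counter loop at depth d ≥ 1 equals B's recursive matcher,
-- chained through the remaining (d - 1) open depths
theorem pvDepth_eq_match (s : List Char) (n : Nat) :
    ∀ (i d : Int) (f : Nat), -(s.length : Int) ≤ i → i ≤ (s.length : Int) →
      ((s.length : Int) - i).toNat ≤ n → ((s.length : Int) - i).toNat ≤ f → 1 ≤ d →
      pvDepthLoopA s i d =
        (if d = 1 then pvMatch s f i else pvDepthLoopA s (pvMatch s f i) (d - 1)) := by
  induction n with
  | zero =>
    intro i d f hlo hhi hn hf hd
    have hieq : i = (s.length : Int) := by omega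
    have hb : pvMatch s f i = (s.length : Int) := by
      cases f with
      | zero => simp only [pvMatch]; omega
      | succ f => exact pvMatch_end s f i (by omega)
    rw [hb, pvDepthLoopA_end s i d (by omega), pvDepthLoopA_end s (s.length : Int) (d - 1) (by omega)]
    split <;> omega
  | succ n ih =>
    intro i d f hlo hhi hn hf hd
    by_cases hi : i < (s.length : Int)
    · obtain ⟨f', rfl⟩ : ∃ f', f = f' + 1 := ⟨f - 1, by omega⟩
      obtain ⟨c, h⟩ := pvGet_some s i hlo hi
      rw [pvDepthLoopA_step s i d c hi h, pvMatch_step s f' i c hi h]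
      by_cases hc : c = '['
      · rw [if_pos hc, if_pos hc]
        rw [ih (i + 1) (d + 1) f' (by omega) (by omega) (by omega) (by omega) (by omega)]
        rw [if_neg (by omega : ¬ (d + 1 = 1))]
        have hb := pvMatch_bounds s f' (i + 1) (by omega) (by omega) (by omega)
        have hj1 : i + 1 ≤ pvMatch s f' (i + 1) ∧ pvMatch s f' (i + 1) ≤ (s.length : Int) := by
          by_cases hin : i + 1 < (s.length : Int)
          · exact ⟨by have := hb.1 hin; omega, hb.2.1⟩
          · have := hb.2.2 (by omega); omega
        have := ih (pvMatch s f' (i + 1)) d f' (by omega) (by omega) (by omega) (by omega) hd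
        simpa using this
      · by_cases hc2 : c = ']'
        · rw [if_neg hc, if_pos hc2, if_neg hc, if_pos hc2]
          by_cases hd1 : d = 1
          · rw [if_pos hd1, if_pos (by omega : d - 1 = 0)]
          · rw [if_neg hd1, if_neg (by omega : ¬ (d - 1 = 0))]
        · rw [if_neg hc, if_neg hc2, if_neg hc, if_neg hc2]
          exact ih (i + 1) d f' (by omega) (by omega) (by omega) (by omega) hd
    · have hb : pvMatch s f i = (s.length : Int) := by
        cases f with
        | zero => simp only [pvMatch]; omega
        | succ f => exact pvMatch_end s f i (by omega)
      rw [hb, pvDepthLoopA_end s i d (by omega), pvDepthLoopA_end s (s.length : Int) (d - 1) (by omega)]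
      split <;> omega

-- A's depth loop started on the opening bracket agrees with B's _match started just past it
theorem pvOpen_eq (s : List Char) (p : Int)
    (hlo : -(s.length : Int) ≤ p) (hp : p < (s.length : Int))
    (hget : PySem.List.pyGet? s p = some '[') :
    pvDepthLoopA s p 0 = pvMatch s ((s.length : Int) - p).toNat (p + 1) := by
  rw [pvDepthLoopA_step s p 0 '[' hp hget, if_pos rfl]
  have := pvDepth_eq_match s ((s.length : Int) - (p + 1)).toNat (p + 1) 1
      (((s.length : Int) - p).toNat) (by omega) (by omega) (by omega) (by omega) (by omega)
  simpa using this

-- B's scanner described in terms of A's staged structure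
theorem pvScan_eq (s : List Char) (pos : Int) (hlo : -(s.length : Int) ≤ pos) :
    pvScan s pos =
      (if pvSkipWsA s pos < (s.length : Int) ∧
          PySem.List.pyGet? s (pvSkipWsA s pos) = some '[' then
        pvMatch s ((s.length : Int) - pvSkipWsA s pos).toNat (pvSkipWsA s pos + 1)
      else pvSkipWsA s pos) := by
  by_cases hi : pos < (s.length : Int)
  · obtain ⟨c, h⟩ := pvGet_some s pos hlo hi
    rw [pvScan, dif_neg (by omega : ¬ ¬ pos < (s.length : Int))]
    simp only [h]
    by_cases hc : c = '['
    · have hws : pvIsWs c = false := by subst hc; decide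
      have hwsend : pvSkipWsA s pos = pos := by
        rw [pvSkipWsA, dif_pos hi]; simp [h, hws]
      rw [if_pos hc, hwsend, if_pos ⟨hi, by rw [hwsend] at *; simpa [hc] using h⟩]
    · by_cases hws : pvIsWs c
      · have hcne : ¬ c = ']' ∨ True := Or.inr trivial
        have hrec := pvScan_eq s (pos + 1) (by omega)
        have hwsstep : pvSkipWsA s pos = pvSkipWsA s (pos + 1) := by
          rw [pvSkipWsA, dif_pos hi]; simp [h, hws]
        rw [if_neg hc, if_neg (by simpa using hws), hrec, hwsstep]
      · have hwsend : pvSkipWsA s pos = pos := by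
          rw [pvSkipWsA, dif_pos hi]; simp [h, hws]
        rw [if_neg hc, if_pos (by simpa using hws)]
        rw [hwsend, if_neg]
        rintro ⟨-, hg⟩
        rw [h] at hg
        exact hc (by injection hg)
  · have hwsend : pvSkipWsA s pos = pos := by rw [pvSkipWsA, dif_neg hi]
    rw [pvScan, dif_pos (by omega : ¬ pos < (s.length : Int)), hwsend, if_neg]
    rintro ⟨hlt, -⟩; exact hi hlt
termination_by ((s.length : Int) - pos).toNat
decreasing_by omega

-- ===== VERDICT (by name: the statement is the Claim_ definition above) =====
theorem skip_optional_spec : Claim_equal_skip_optional := by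
  intro text pos _hdom hpre
  unfold Spec_skip_optional skip_optional skip_optional_alt
  rw [pvScan_eq text.toList pos hpre]
  have hplo : -((text.toList).length : Int) ≤ pvSkipWsA text.toList pos :=
    le_trans hpre (pvSkipWsA_ge text.toList pos)
  by_cases hcond : pvSkipWsA text.toList pos < ((text.toList).length : Int) ∧
      PySem.List.pyGet? text.toList (pvSkipWsA text.toList pos) = some '['
  · rw [if_pos hcond, if_pos hcond]
    exact pvOpen_eq text.toList (pvSkipWsA text.toList pos) hplo hcond.1 hcond.2
  · rw [if_neg hcond, if_neg hcond]
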